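-- pv_equiv track=rewrite | github.com/TessFerrandez/algorithms | contest/warmup/lc-m-386-lexiographical-numbers.py | lexicalOrder2
-- ===== SOURCE A (Python) =====
-- from functools import cmp_to_key
-- from typing import List
--
-- def lexicalOrder2(n: int) -> List[int]:
--     highest = 1
--
--     while highest * 10 <= n:
--         highest *= 10
--
--     def mycmp(a, b, highest=highest):
--         while a < highest:
--             a *= 10
--         while b < highest:
--             b *= 10
--         return -1 if a < b else b < a
--
--     return sorted(range(1, n + 1), key=cmp_to_key(mycmp))
-- ===== SOURCE B (Python) =====
-- from typing import List
--
-- def lexicalOrder2(n: int) -> List[int]: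
--     # Preorder DFS over the decimal trie: visit x, then its children 10x .. 10x+9
--     # (clipped to n); this emits 1..n directly in lexical order, no sorting.
--     # The output has exactly n entries, so it is allocated up front and filled.
--     result = [0] * (n if n > 0 else 0)
--     pos = 0
--
--     def dfs(x):
--         nonlocal pos
--         result[pos] = x
--         pos += 1
--         lo = 10 * x
--         if lo <= n:
--             hi = lo + 10 if lo + 10 <= n + 1 else n + 1
--             for c in range(lo, hi):
--                 dfs(c)
--
--     hi0 = 10 if 10 <= n + 1 else n + 1
--     for first in range(1, hi0):
--         dfs(first)
--     return result
-- ===== Notes on version B (the rewrite author's own statement) =====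
-- stated objective: faster
-- what changed: A sorts range(1, n+1) with a cmp_to_key comparator that pads both arguments up to the highest power of ten on every comparison; B emits the numbers directly in lexical order by a preorder DFS over the decimal trie (visit x, then children 10x..10x+9), no sorting and no comparator at all.
import Mathlib
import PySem

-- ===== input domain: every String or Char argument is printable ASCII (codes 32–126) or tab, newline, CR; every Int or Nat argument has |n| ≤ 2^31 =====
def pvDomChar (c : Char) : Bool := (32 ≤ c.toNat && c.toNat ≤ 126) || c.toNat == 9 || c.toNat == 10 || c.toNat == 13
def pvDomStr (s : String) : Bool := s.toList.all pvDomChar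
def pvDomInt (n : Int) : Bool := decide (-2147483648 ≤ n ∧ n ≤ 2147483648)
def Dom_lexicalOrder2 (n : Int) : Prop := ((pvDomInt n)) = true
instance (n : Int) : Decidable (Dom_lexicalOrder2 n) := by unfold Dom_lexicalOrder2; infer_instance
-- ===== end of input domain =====

-- B replaces A's comparator sort of range(1, n+1) by a preorder DFS over the decimal
-- trie that emits the numbers directly in lexical order (O(n) vs O(n log n) comparisons,
-- each comparison itself padding both arguments); measured faster.


-- ===== PORT A =====
-- `while highest * 10 <= n: highest *= 10`.  The conjunct `1 ≤ h` is a termination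
-- guard only: the loop starts at 1 and multiplies by 10, so it always holds.
def highestLoop (n h : Int) : Int :=
  if _h0 : 1 ≤ h ∧ h * 10 ≤ n then highestLoop n (h * 10) else h
termination_by (n - h).toNat
decreasing_by omega

-- `while a < highest: a *= 10` inside mycmp.  The conjunct `1 ≤ a` is a termination
-- guard only: mycmp is applied to elements of range(1, n+1), which are all ≥ 1.
def padLoop (H a : Int) : Int :=
  if _h0 : 1 ≤ a ∧ a < H then padLoop H (a * 10) else a
termination_by (H - a).toNat
decreasing_by omega

-- `mycmp` returns -1 / 0 / 1 exactly as the padded a compares to the padded b, so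
-- cmp_to_key(mycmp) sorts by the padded value; Python's sorted is stable, and
-- PySem.List.sorted is the stable sort with a key — exact.
def lexicalOrder2 (n : Int) : List Int :=
  PySem.List.sorted (PySem.List.pyRange 1 (n + 1) 1)
    (fun a => padLoop (highestLoop n 1) a) false

-- ===== PORT B =====
-- dfs(x): emit x; if 10*x <= n, recurse on c in range(10*x, min(10*x+10, n+1)).
-- Source B writes each emitted number into the next slot of a preallocated length-n
-- list; the port builds the same preorder sequence as a list.  The fuel only
-- bounds the recursion depth (each call multiplies x by ≥ 10); the proofs show
-- n.toNat + 1 is always enough.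
def dfsGen (n : Int) : Nat → Int → List Int
  | 0, _ => []
  | fuel + 1, x =>
      x :: (if 10 * x ≤ n then
              (PySem.List.pyRange (10 * x)
                 (if 10 * x + 10 ≤ n + 1 then 10 * x + 10 else n + 1) 1).flatMap
                (dfsGen n fuel)
            else [])

def lexicalOrder2_alt (n : Int) : List Int :=
  (PySem.List.pyRange 1 (if 10 ≤ n + 1 then 10 else n + 1) 1).flatMap
    (dfsGen n (n.toNat + 1))

-- ===== PRECONDITION & SPEC =====
def Spec_lexicalOrder2 (n : Int) (out : List Int) : Prop := out = lexicalOrder2_alt n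
instance (n : Int) (out : List Int) : Decidable (Spec_lexicalOrder2 n out) := by unfold Spec_lexicalOrder2; infer_instance

-- ===== CLAIM (what is proved, stated in full; the proofs are below) =====
def Claim_equal_lexicalOrder2 : Prop := ∀ (n : Int), Dom_lexicalOrder2 n → Spec_lexicalOrder2 n (lexicalOrder2 n)

-- ===== LEMMAS AND PROOFS =====

-- The strict linear-ish order in which both programs list 1..n: by padded value,
-- ties (x and x·10^k pad alike) broken by numeric value.
def ltK (H a b : Int) : Prop :=
  padLoop H a < padLoop H b ∨ (padLoop H a = padLoop H b ∧ a < b)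

lemma highestLoop_spec (n : Int) (g : Int) (j : Nat) (hg : g = 10 ^ j) (hgn : g ≤ n) :
    ∃ h : Nat, highestLoop n g = 10 ^ h ∧ 10 ^ h ≤ n ∧ n < 10 ^ (h + 1) := by
  rw [highestLoop]
  split
  · next hc =>
      exact highestLoop_spec n (g * 10) (j + 1) (by rw [hg]; ring) hc.2
  · next hc =>
      have h1 : (1:Int) ≤ 10 ^ j := one_le_pow₀ (by norm_num)
      refine ⟨j, hg, hg ▸ hgn, ?_⟩
      have : ¬ (g * 10 ≤ n) := by
        intro hle; exact hc ⟨by omega, hle⟩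
      have : n < 10 ^ j * 10 := by omega
      calc n < 10 ^ j * 10 := this
        _ = 10 ^ (j + 1) := by ring
termination_by (n - g).toNat
decreasing_by
  have h1 : (1:Int) ≤ 10 ^ j := one_le_pow₀ (by norm_num)
  omega

lemma padLoop_specH (H a : Int) (ha : 1 ≤ a) (hub : a < 10 * H) :
    ∃ e : Nat, padLoop H a = a * 10 ^ e ∧ H ≤ a * 10 ^ e ∧ a * 10 ^ e < 10 * H := by
  rw [padLoop]
  split
  · next hc =>
      obtain ⟨e, he, hl, hu⟩ := padLoop_specH H (a * 10) (by omega) (by omega)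
      refine ⟨e + 1, ?_, ?_, ?_⟩
      · rw [he]; ring
      · calc H ≤ a * 10 * 10 ^ e := hl
          _ = a * 10 ^ (e + 1) := by ring
      · calc a * 10 ^ (e + 1) = a * 10 * 10 ^ e := by ring
          _ < 10 * H := hu
  · next hc =>
      exact ⟨0, by ring, by simp; omega, by simpa using hub⟩
termination_by (H - a).toNat
decreasing_by omega

lemma padLoop_spec (h : Nat) (a : Int) (ha : 1 ≤ a) (hub : a < 10 ^ (h + 1)) :
    ∃ e : Nat, padLoop (10 ^ h) a = a * 10 ^ e ∧ 10 ^ h ≤ a * 10 ^ e ∧ a * 10 ^ e < 10 ^ (h + 1) := by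
  have hps : (10:Int) ^ (h + 1) = 10 * 10 ^ h := by ring
  obtain ⟨e, h1, h2, h3⟩ := padLoop_specH (10 ^ h) a ha (by omega)
  exact ⟨e, h1, h2, by omega⟩

lemma pow_unique (h e f : Nat) (a : Int) (ha : 1 ≤ a)
    (h1 : 10 ^ h ≤ a * 10 ^ e) (h2 : a * 10 ^ e < 10 ^ (h + 1))
    (h3 : 10 ^ h ≤ a * 10 ^ f) (h4 : a * 10 ^ f < 10 ^ (h + 1)) : e = f := by
  have key : ∀ (e f : Nat), e < f → 10 ^ h ≤ a * 10 ^ e → a * 10 ^ f < 10 ^ (h + 1) → False := by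
    intro e f hef hle hlt
    have hsplit : a * 10 ^ f = (a * 10 ^ e) * 10 ^ (f - e) := by
      rw [mul_assoc, ← pow_add]
      congr 2
      omega
    have h10 : (10:Int) ≤ 10 ^ (f - e) := by
      calc (10:Int) = 10 ^ 1 := (pow_one 10).symm
        _ ≤ 10 ^ (f - e) := pow_le_pow_right₀ (by norm_num) (by omega)
    have hpos : (0:Int) < 10 ^ h := pow_pos (by norm_num) h
    have : (10:Int) ^ (h + 1) ≤ a * 10 ^ f := by
      calc (10:Int) ^ (h + 1) = 10 ^ h * 10 := by ring
        _ ≤ (a * 10 ^ e) * 10 ^ (f - e) := mul_le_mul hle h10 (by norm_num) (by nlinarith)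
        _ = a * 10 ^ f := hsplit.symm
    omega
  rcases Nat.lt_trichotomy e f with hlt | heq | hgt
  · exact absurd (key e f hlt h1 h4) (by simp)
  · exact heq
  · exact absurd (key f e hgt h3 h2) (by simp)

-- every member of the decimal subtree of a pads into [pad a, (a+1)·10^(e a))
lemma subtree_pad (n : Int) (h : Nat) (hn1 : 10 ^ h ≤ n) (hn2 : n < 10 ^ (h + 1))
    (a m : Int) (k : Nat) (ha : 1 ≤ a) (han : a ≤ n) (hmn : m ≤ n)
    (hlo : a * 10 ^ k ≤ m) (hhi : m < (a + 1) * 10 ^ k) :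
    ∃ e : Nat, padLoop (10 ^ h) a = a * 10 ^ e ∧
      a * 10 ^ e ≤ padLoop (10 ^ h) m ∧ padLoop (10 ^ h) m < (a + 1) * 10 ^ e ∧
      10 ^ h ≤ a * 10 ^ e ∧ a * 10 ^ e < 10 ^ (h + 1) := by
  have hpk : (1:Int) ≤ 10 ^ k := one_le_pow₀ (by norm_num)
  have hm1 : 1 ≤ m := by nlinarith
  obtain ⟨ea, hea, hea1, hea2⟩ := padLoop_spec h a ha (by omega)
  obtain ⟨em, hem, hem1, hem2⟩ := padLoop_spec h m hm1 (by omega)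
  have hpem : (0:Int) < 10 ^ em := pow_pos (by norm_num) em
  have key1 : a * 10 ^ (k + em) ≤ m * 10 ^ em := by
    calc a * 10 ^ (k + em) = (a * 10 ^ k) * 10 ^ em := by rw [pow_add]; ring
      _ ≤ m * 10 ^ em := by nlinarith
  have key2 : m * 10 ^ em < (a + 1) * 10 ^ (k + em) := by
    calc m * 10 ^ em < ((a + 1) * 10 ^ k) * 10 ^ em := by nlinarith
      _ = (a + 1) * 10 ^ (k + em) := by rw [pow_add]; ring
  have hup : a * 10 ^ (k + em) < 10 ^ (h + 1) := by omega
  have hlow : 10 ^ h ≤ a * 10 ^ (k + em) := by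
    by_contra hcon
    push_neg at hcon
    have hpkem : (1:Int) ≤ 10 ^ (k + em) := one_le_pow₀ (by norm_num)
    have hlt : k + em < h := by
      have : (10:Int) ^ (k + em) < 10 ^ h := by nlinarith
      exact (pow_lt_pow_iff_right₀ (by norm_num : (1:Int) < 10)).mp this
    have hsplit : (10:Int) ^ h = 10 ^ (h - (k + em)) * 10 ^ (k + em) := by
      rw [← pow_add]; congr 1; omega
    have hac : a < 10 ^ (h - (k + em)) := by
      by_contra hge
      push_neg at hge
      nlinarith
    have : (a + 1) * 10 ^ (k + em) ≤ 10 ^ h := by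
      rw [hsplit]
      have : a + 1 ≤ 10 ^ (h - (k + em)) := by omega
      nlinarith
    omega
  have heq : ea = k + em := pow_unique h ea (k + em) a ha hea1 hea2 hlow hup
  refine ⟨ea, hea, ?_, ?_, hea1, hea2⟩
  · rw [hem, heq]; exact key1
  · rw [hem, heq]; exact key2

-- two subtrees rooted at a < a' in the same decade are separated in pad order
lemma subtree_sep (n : Int) (h : Nat) (hn1 : 10 ^ h ≤ n) (hn2 : n < 10 ^ (h + 1))
    (a a' m m' : Int) (k k' : Nat) (j : Nat)
    (ha : 1 ≤ a) (haa : a < a') (han : a ≤ n) (han' : a' ≤ n)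
    (hj1 : 10 ^ j ≤ a) (hj2 : a' < 10 ^ (j + 1))
    (hmn : m ≤ n) (hmn' : m' ≤ n)
    (hlo : a * 10 ^ k ≤ m) (hhi : m < (a + 1) * 10 ^ k)
    (hlo' : a' * 10 ^ k' ≤ m') (hhi' : m' < (a' + 1) * 10 ^ k') :
    padLoop (10 ^ h) m < padLoop (10 ^ h) m' := by
  obtain ⟨e, hea, hp1, hp2, hb1, hb2⟩ := subtree_pad n h hn1 hn2 a m k ha han hmn hlo hhi
  obtain ⟨e', hea', hp1', hp2', hb1', hb2'⟩ :=
    subtree_pad n h hn1 hn2 a' m' k' (by omega) han' hmn' hlo' hhi'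
  have hpe : (0:Int) < 10 ^ e := pow_pos (by norm_num) e
  -- a' * 10 ^ e also lies in [10^h, 10^(h+1)), hence e' = e
  have hlow : 10 ^ h ≤ a' * 10 ^ e := by nlinarith
  have hje : j + e < h + 1 := by
    have h1 : (10:Int) ^ (j + e) ≤ a * 10 ^ e := by
      rw [pow_add]; nlinarith [pow_pos (by norm_num : (0:Int) < 10) j]
    have h2 : (10:Int) ^ (j + e) < 10 ^ (h + 1) := by omega
    exact (pow_lt_pow_iff_right₀ (by norm_num : (1:Int) < 10)).mp h2
  have hup : a' * 10 ^ e < 10 ^ (h + 1) := by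
    have h1 : a' * 10 ^ e < 10 ^ (j + 1 + e) := by
      rw [pow_add]; nlinarith [pow_pos (by norm_num : (0:Int) < 10) (j+1)]
    have h2 : (10:Int) ^ (j + 1 + e) ≤ 10 ^ (h + 1) := pow_le_pow_right₀ (by norm_num) (by omega)
    omega
  have heq : e' = e := pow_unique h e' e a' (by omega) hb1' hb2' hlow hup
  have : (a + 1) * 10 ^ e ≤ a' * 10 ^ e := by nlinarith
  rw [heq] at hp1'
  omega

lemma lead_digit (x : Int) (hx : 1 ≤ x) : ∃ t : Nat, 10 ^ t ≤ x ∧ x < 10 ^ (t + 1) := by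
  induction x, hx using Int.le_induction with
  | base => exact ⟨0, by norm_num⟩
  | succ x hx ih =>
      obtain ⟨t, h1, h2⟩ := ih
      by_cases hc : x + 1 < 10 ^ (t + 1)
      · exact ⟨t, by omega, hc⟩
      · refine ⟨t + 1, by omega, ?_⟩
        have : (10:Int) ^ (t + 1) ≤ 10 ^ (t + 1 + 1) := pow_le_pow_right₀ (by norm_num) (by omega)
        have h3 : (1:Int) ≤ 10 ^ (t+1) := one_le_pow₀ (by norm_num)
        have h4 : (10:Int) ^ (t + 1 + 1) = 10 * 10 ^ (t + 1) := by ring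
        omega

lemma dfsGen_mem (n : Int) (fuel : Nat) (x m : Int) (hx : 1 ≤ x) (hxn : x ≤ n)
    (hfuel : n - x + 1 ≤ (fuel : Int)) :
    m ∈ dfsGen n fuel x ↔ m ≤ n ∧ ∃ k : Nat, x * 10 ^ k ≤ m ∧ m < (x + 1) * 10 ^ k := by
  match fuel, hfuel with
  | 0, hfuel => omega
  | fuel + 1, hfuel =>
    simp only [dfsGen, List.mem_cons]
    constructor
    · rintro (rfl | hrest)
      · exact ⟨hxn, 0, by simp⟩
      · split at hrest
        · next h10 =>
            rw [List.mem_flatMap] at hrest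
            obtain ⟨c, hc, hmc⟩ := hrest
            rw [PySem.List.mem_pyRange_one] at hc
            have hcb : 10 * x ≤ c ∧ c < 10 * x + 10 ∧ c ≤ n := by
              constructor
              · exact hc.1
              constructor
              · have := hc.2; split at this <;> omega
              · have := hc.2; split at this <;> omega
            have hc1 : 1 ≤ c := by omega
            have ihm := dfsGen_mem n fuel c m hc1 hcb.2.2 (by push_cast at hfuel ⊢; omega)
            obtain ⟨hmn, k, hk1, hk2⟩ := ihm.mp hmc
            have hpk : (0:Int) < 10 ^ k := pow_pos (by norm_num) k
            refine ⟨hmn, k + 1, ?_, ?_⟩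
            · calc x * 10 ^ (k + 1) = (10 * x) * 10 ^ k := by ring
                _ ≤ c * 10 ^ k := by nlinarith
                _ ≤ m := hk1
            · calc m < (c + 1) * 10 ^ k := hk2
                _ ≤ (10 * x + 10) * 10 ^ k := by nlinarith
                _ = (x + 1) * 10 ^ (k + 1) := by ring
        · simp at hrest
    · rintro ⟨hmn, k, hk1, hk2⟩
      match k with
      | 0 => left; simp at hk1 hk2; omega
      | k + 1 =>
        right
        have hP : (0:Int) < 10 ^ k := pow_pos (by norm_num) k
        set c : Int := m / 10 ^ k with hc
        have hc3 : c * 10 ^ k ≤ m := Int.ediv_mul_le m (by positivity)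
        have hc4 : m < (c + 1) * 10 ^ k := Int.lt_ediv_add_one_mul_self m hP
        have hc1 : 10 * x ≤ c := by
          rw [hc, Int.le_ediv_iff_mul_le hP]
          calc 10 * x * 10 ^ k = x * 10 ^ (k + 1) := by ring
            _ ≤ m := hk1
        have hc2 : c < 10 * x + 10 := by
          rw [hc, Int.ediv_lt_iff_lt_mul hP]
          calc m < (x + 1) * 10 ^ (k + 1) := hk2
            _ = (10 * x + 10) * 10 ^ k := by ring
        have hcn : c ≤ n := by nlinarith
        have h10 : 10 * x ≤ n := by omega
        rw [if_pos h10, List.mem_flatMap]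
        refine ⟨c, ?_, ?_⟩
        · rw [PySem.List.mem_pyRange_one]
          constructor
          · exact hc1
          · split <;> omega
        · exact (dfsGen_mem n fuel c m (by omega) hcn (by push_cast at hfuel ⊢; omega)).mpr
            ⟨hmn, k, hc3, hc4⟩

lemma dfsGen_pairwise (n : Int) (h : Nat) (hn1 : 10 ^ h ≤ n) (hn2 : n < 10 ^ (h + 1))
    (fuel : Nat) (x : Int) (hx : 1 ≤ x) (hxn : x ≤ n)
    (hfuel : n - x + 1 ≤ (fuel : Int)) :
    (dfsGen n fuel x).Pairwise (ltK (10 ^ h)) := by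
  match fuel, hfuel with
  | 0, hfuel => omega
  | fuel + 1, hfuel =>
    simp only [dfsGen]
    rw [List.pairwise_cons]
    constructor
    · intro m hm
      split at hm
      · next h10 =>
          rw [List.mem_flatMap] at hm
          obtain ⟨c, hc, hmc⟩ := hm
          rw [PySem.List.mem_pyRange_one] at hc
          have hcb : 10 * x ≤ c ∧ c < 10 * x + 10 ∧ c ≤ n := by
            refine ⟨hc.1, ?_, ?_⟩ <;> (have := hc.2; split at this <;> omega)
          obtain ⟨hmn, k, hk1, hk2⟩ :=
            (dfsGen_mem n fuel c m (by omega) hcb.2.2 (by push_cast at hfuel ⊢; omega)).mp hmc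
          have hpk : (0:Int) < 10 ^ k := pow_pos (by norm_num) k
          have hx1 : x * 10 ^ (k + 1) ≤ m := by
            calc x * 10 ^ (k + 1) = (10 * x) * 10 ^ k := by ring
              _ ≤ c * 10 ^ k := by nlinarith
              _ ≤ m := hk1
          have hx2 : m < (x + 1) * 10 ^ (k + 1) := by
            calc m < (c + 1) * 10 ^ k := hk2
              _ ≤ (10 * x + 10) * 10 ^ k := by nlinarith
              _ = (x + 1) * 10 ^ (k + 1) := by ring
          obtain ⟨e, hea, hp1, hp2, _, _⟩ :=
            subtree_pad n h hn1 hn2 x m (k + 1) hx hxn hmn hx1 hx2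
          have hxm : x < m := by nlinarith
          rcases lt_or_eq_of_le hp1 with hlt | heqp
          · exact Or.inl (by rw [hea]; exact hlt)
          · exact Or.inr ⟨by rw [hea, heqp], hxm⟩
      · simp at hm
    · split
      · next h10 =>
          rw [List.pairwise_flatMap]
          constructor
          · intro c hc
            rw [PySem.List.mem_pyRange_one] at hc
            have hcb : 10 * x ≤ c ∧ c < 10 * x + 10 ∧ c ≤ n := by
              refine ⟨hc.1, ?_, ?_⟩ <;> (have := hc.2; split at this <;> omega)
            exact dfsGen_pairwise n h hn1 hn2 fuel c (by omega) hcb.2.2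
              (by push_cast at hfuel ⊢; omega)
          · refine List.Pairwise.imp_of_mem ?_
              (PySem.List.pairwise_lt_pyRange_one (10 * x) _)
            intro c c' hcm hcm' hlt m hm m' hm'
            rw [PySem.List.mem_pyRange_one] at hcm hcm'
            have hcb : 10 * x ≤ c ∧ c < 10 * x + 10 ∧ c ≤ n := by
              refine ⟨hcm.1, ?_, ?_⟩ <;> (have := hcm.2; split at this <;> omega)
            have hcb' : 10 * x ≤ c' ∧ c' < 10 * x + 10 ∧ c' ≤ n := by
              refine ⟨hcm'.1, ?_, ?_⟩ <;> (have := hcm'.2; split at this <;> omega)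
            obtain ⟨hmn, k, hk1, hk2⟩ :=
              (dfsGen_mem n fuel c m (by omega) hcb.2.2 (by push_cast at hfuel ⊢; omega)).mp hm
            obtain ⟨hmn', k', hk1', hk2'⟩ :=
              (dfsGen_mem n fuel c' m' (by omega) hcb'.2.2 (by push_cast at hfuel ⊢; omega)).mp hm'
            obtain ⟨t, ht1, ht2⟩ := lead_digit x hx
            have hdec1 : (10:Int) ^ (t + 1) ≤ c := by
              have : (10:Int) ^ (t + 1) = 10 * 10 ^ t := by ring
              omega
            have hdec2 : c' < 10 ^ (t + 1 + 1) := by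
              have : (10:Int) ^ (t + 1 + 1) = 10 * 10 ^ (t + 1) := by ring
              have h2 : (10:Int) ^ (t + 1) = 10 * 10 ^ t := by ring
              omega
            exact Or.inl (subtree_sep n h hn1 hn2 c c' m m' k k' (t + 1) (by omega) hlt
              hcb.2.2 hcb'.2.2 hdec1 hdec2 hmn hmn' hk1 hk2 hk1' hk2')
      · simp

lemma insertBy_perm {α : Type} (bf : α → α → Bool) (x : α) (l : List α) :
    (PySem.List.insertBy bf x l).Perm (x :: l) := by
  induction l with
  | nil => simp [PySem.List.insertBy]
  | cons y ys ih =>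
      rw [PySem.List.insertBy]
      split
      · exact List.Perm.refl _
      · exact (ih.cons y).trans (List.Perm.swap x y ys)

lemma insertBy_pairwise (H x : Int) (l : List Int)
    (hl : l.Pairwise (ltK H)) (hlt : ∀ y ∈ l, y < x) :
    (PySem.List.insertBy (fun a b => decide (padLoop H a < padLoop H b)) x l).Pairwise (ltK H) := by
  induction l with
  | nil => simp [PySem.List.insertBy]
  | cons y ys ih =>
      rw [List.pairwise_cons] at hl
      obtain ⟨hy, hys⟩ := hl
      rw [PySem.List.insertBy]
      split
      · next hxy =>
          rw [decide_eq_true_iff] at hxy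
          rw [List.pairwise_cons]
          constructor
          · intro z hz
            rcases List.mem_cons.mp hz with rfl | hz'
            · exact Or.inl hxy
            · rcases hy z hz' with h1 | h2
              · exact Or.inl (by omega)
              · exact Or.inl (by omega)
          · exact List.pairwise_cons.mpr ⟨hy, hys⟩
      · next hxy =>
          rw [decide_eq_true_iff] at hxy
          rw [List.pairwise_cons]
          constructor
          · intro z hz
            rcases List.mem_cons.mp ((insertBy_perm _ x ys).mem_iff.mp hz) with rfl | hz'
            · have hyx : y < z := hlt y List.mem_cons_self
              rcases lt_or_eq_of_le (not_lt.mp hxy) with h1 | h2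
              · exact Or.inl h1
              · exact Or.inr ⟨h2, hyx⟩
            · exact hy z hz'
          · exact ih hys (fun z hz => hlt z (List.mem_cons_of_mem y hz))

lemma fold_insert (H : Int) (xs acc : List Int)
    (hxs : xs.Pairwise (· < ·)) (hacc : acc.Pairwise (ltK H))
    (hsep : ∀ y ∈ acc, ∀ z ∈ xs, y < z) :
    (List.foldl (fun acc x => PySem.List.insertBy (fun a b => decide (padLoop H a < padLoop H b)) x acc) acc xs).Perm (acc ++ xs) ∧
    (List.foldl (fun acc x => PySem.List.insertBy (fun a b => decide (padLoop H a < padLoop H b)) x acc) acc xs).Pairwise (ltK H) := by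
  induction xs generalizing acc with
  | nil => exact ⟨by simpa using List.Perm.refl acc, hacc⟩
  | cons x xs ih =>
      rw [List.pairwise_cons] at hxs
      obtain ⟨hx, hxs'⟩ := hxs
      have hltx : ∀ y ∈ acc, y < x := fun y hy => hsep y hy x List.mem_cons_self
      have hacc' := insertBy_pairwise H x acc hacc hltx
      have hsep' : ∀ y ∈ PySem.List.insertBy (fun a b => decide (padLoop H a < padLoop H b)) x acc,
          ∀ z ∈ xs, y < z := by
        intro y hy z hz
        rcases List.mem_cons.mp ((insertBy_perm _ x acc).mem_iff.mp hy) with rfl | hy'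
        · exact hx z hz
        · exact hsep y hy' z (List.mem_cons_of_mem x hz)
      obtain ⟨hp, hq⟩ := ih _ hxs' hacc' hsep'
      refine ⟨?_, hq⟩
      simp only [List.foldl_cons]
      refine hp.trans ?_
      refine ((insertBy_perm _ x acc).append_right xs).trans ?_
      exact List.perm_middle.symm

-- ===== VERDICT (by name: the statement is the Claim_ definition above) =====
lemma alt_roots_mem (n r : Int) :
    r ∈ PySem.List.pyRange 1 (if 10 ≤ n + 1 then 10 else n + 1) 1 ↔ 1 ≤ r ∧ r < 10 ∧ r ≤ n := by
  rw [PySem.List.mem_pyRange_one]; split <;> omega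

lemma alt_mem (n : Int) (hn : 1 ≤ n) (m : Int) :
    m ∈ lexicalOrder2_alt n ↔ 1 ≤ m ∧ m < n + 1 := by
  rw [lexicalOrder2_alt, List.mem_flatMap]
  constructor
  · rintro ⟨r, hr, hm⟩
    rw [alt_roots_mem] at hr
    obtain ⟨hmn, k, hk1, hk2⟩ := (dfsGen_mem n (n.toNat + 1) r m hr.1 hr.2.2
      (by push_cast; omega)).mp hm
    have hpk : (1:Int) ≤ 10 ^ k := one_le_pow₀ (by norm_num)
    constructor
    · nlinarith [hr.1]
    · omega
  · rintro ⟨hm1, hm2⟩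
    obtain ⟨t, ht1, ht2⟩ := lead_digit m hm1
    have hP : (0:Int) < 10 ^ t := pow_pos (by norm_num) t
    refine ⟨m / 10 ^ t, ?_, ?_⟩
    · rw [alt_roots_mem]
      have hr1 : 1 ≤ m / 10 ^ t := by
        rw [Int.le_ediv_iff_mul_le hP]; omega
      have hr2 : m / 10 ^ t < 10 := by
        rw [Int.ediv_lt_iff_lt_mul hP]
        calc m < 10 ^ (t + 1) := ht2
          _ = 10 * 10 ^ t := by ring
      have hr3 : m / 10 ^ t ≤ m := Int.ediv_le_self _ (by omega)
      exact ⟨hr1, hr2, by omega⟩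
    · have hr1 : 1 ≤ m / 10 ^ t := by
        rw [Int.le_ediv_iff_mul_le hP]; omega
      have hr3 : m / 10 ^ t ≤ m := Int.ediv_le_self _ (by omega)
      refine (dfsGen_mem n (n.toNat + 1) (m / 10 ^ t) m hr1 (by omega) (by push_cast; omega)).mpr
        ⟨by omega, t, Int.ediv_mul_le m (by positivity), Int.lt_ediv_add_one_mul_self m hP⟩

lemma alt_pairwise (n : Int) (h : Nat) (hn1 : 10 ^ h ≤ n) (hn2 : n < 10 ^ (h + 1)) :
    (lexicalOrder2_alt n).Pairwise (ltK (10 ^ h)) := by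
  have hn : 1 ≤ n := le_trans (one_le_pow₀ (by norm_num)) hn1
  rw [lexicalOrder2_alt, List.pairwise_flatMap]
  constructor
  · intro r hr
    rw [alt_roots_mem] at hr
    exact dfsGen_pairwise n h hn1 hn2 _ r hr.1 hr.2.2 (by push_cast; omega)
  · refine List.Pairwise.imp_of_mem ?_ (PySem.List.pairwise_lt_pyRange_one 1 _)
    intro r r' hrm hrm' hlt m hm m' hm'
    rw [alt_roots_mem] at hrm hrm'
    obtain ⟨hmn, k, hk1, hk2⟩ := (dfsGen_mem n (n.toNat + 1) r m hrm.1 hrm.2.2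
      (by push_cast; omega)).mp hm
    obtain ⟨hmn', k', hk1', hk2'⟩ := (dfsGen_mem n (n.toNat + 1) r' m' hrm'.1 hrm'.2.2
      (by push_cast; omega)).mp hm'
    refine Or.inl (subtree_sep n h hn1 hn2 r r' m m' k k' 0 hrm.1 hlt hrm.2.2 hrm'.2.2
      (by norm_num; omega) (by norm_num; omega) hmn hmn' hk1 hk2 hk1' hk2')

-- ===== VERDICT (by name: the statement is the Claim_ definition above) =====
theorem lexicalOrder2_spec : Claim_equal_lexicalOrder2 := by
  intro n _dom
  show lexicalOrder2 n = lexicalOrder2_alt n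
  by_cases hn : 1 ≤ n
  · obtain ⟨h, hH, hn1, hn2⟩ := highestLoop_spec n 1 0 (by norm_num) (by omega)
    have hA : lexicalOrder2 n =
        List.foldl (fun acc x => PySem.List.insertBy
          (fun a b => decide (padLoop (10 ^ h) a < padLoop (10 ^ h) b)) x acc) []
          (PySem.List.pyRange 1 (n + 1) 1) := by
      rw [lexicalOrder2, hH]
      simp [PySem.List.sorted]
    obtain ⟨hperm, hpw⟩ := fold_insert (10 ^ h) (PySem.List.pyRange 1 (n + 1) 1) []
      (PySem.List.pairwise_lt_pyRange_one 1 (n + 1)) (by simp) (by simp)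
    rw [List.nil_append] at hperm
    have hGpw := alt_pairwise n h hn1 hn2
    have hne : ∀ a b : Int, ltK (10 ^ h) a b → a ≠ b := by
      rintro a b hab rfl
      unfold ltK at hab
      omega
    have hGnodup : (lexicalOrder2_alt n).Nodup :=
      List.Pairwise.imp (fun hab => hne _ _ hab) hGpw
    have hpermG : (PySem.List.pyRange 1 (n + 1) 1).Perm (lexicalOrder2_alt n) :=
      (List.perm_ext_iff_of_nodup (PySem.List.nodup_pyRange_one 1 (n + 1)) hGnodup).mpr
        (fun a => by rw [PySem.List.mem_pyRange_one, alt_mem n hn a])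
    rw [hA]
    exact List.Perm.eq_of_pairwise
      (fun a b _ _ hab hba => by unfold ltK at hab hba; omega)
      hpw hGpw (hperm.trans hpermG)
  · have hr : PySem.List.pyRange 1 (n + 1) 1 = [] := PySem.List.pyRange_one_eq_nil (by omega)
    rw [lexicalOrder2, lexicalOrder2_alt, if_neg (by omega : ¬ (10:Int) ≤ n + 1), hr]
    simp [PySem.List.sorted]
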